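-- pv_equiv track=rewrite | github.com/Miles128/NoteAI | tests/test_yaml_simple.py | _escape_yaml_string
-- ===== SOURCE A (Python) =====
-- def _escape_yaml_string(value: str) -> str:
--     if not value:
--         return '""'
--
--     needs_quoting = False
--     special_chars = ['"', '\\', '\n', '\r', '\t', '#', ': ', '[', ']', '{', '}', ',', '*', '&', '!', '|', '>', '%', '@', '`']
--
--     for char in special_chars:
--         if char in value:
--             needs_quoting = True
--             break
--
--     if value.startswith((' ', '-', '?', ':')) or value.endswith(' '):
--         needs_quoting = True
--
--     if not needs_quoting:
--         return value
--
--     value = value.replace('\\', '\\\\')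
--     value = value.replace('"', '\\"')
--     value = value.replace('\n', '\\n')
--     value = value.replace('\r', '\\r')
--     value = value.replace('\t', '\\t')
--
--     return f'"{value}"'
-- ===== SOURCE B (Python) =====
-- def _escape_yaml_string(value: str) -> str:
--     if not value:
--         return '""'
--
--     esc = {'\\': '\\\\', '"': '\\"', '\n': '\\n', '\r': '\\r', '\t': '\\t'}
--     singles = set('"\\\n\r\t#[]{},*&!|>%@`')
--
--     needs_quoting = value[0] in ' -?:' or value[-1] == ' '
--     out = []
--     prev = ''
--     for ch in value:
--         if ch in singles or (prev == ':' and ch == ' '):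
--             needs_quoting = True
--         out.append(esc.get(ch, ch))
--         prev = ch
--
--     if not needs_quoting:
--         return value
--     return '"' + ''.join(out) + '"'
-- ===== Notes on version B (the rewrite author's own statement) =====
-- stated objective: alternative
-- what changed: Replaces A's two-phase approach (a membership scan over a 20-token special-character list followed by five sequential str.replace passes) with a single left-to-right scan that simultaneously builds the escaped buffer per character and sets the needs-quoting flag, detecting the two-character colon-space token via a previous-character state; first/last-character checks are read off value[0]/value[-1].
import Mathlib
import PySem

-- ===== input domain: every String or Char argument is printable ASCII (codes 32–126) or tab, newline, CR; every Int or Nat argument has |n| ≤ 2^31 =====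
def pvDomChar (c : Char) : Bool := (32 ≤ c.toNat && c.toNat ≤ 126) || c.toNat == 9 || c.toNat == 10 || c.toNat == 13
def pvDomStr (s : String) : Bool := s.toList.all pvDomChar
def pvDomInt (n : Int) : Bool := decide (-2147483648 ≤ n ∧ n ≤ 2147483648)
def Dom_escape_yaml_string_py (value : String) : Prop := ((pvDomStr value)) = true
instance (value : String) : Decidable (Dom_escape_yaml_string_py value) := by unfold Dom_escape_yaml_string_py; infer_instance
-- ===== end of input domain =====

-- B fuses A's two phases (a membership scan over a special-token list, then five replace passes)
-- into one left-to-right scan that builds the escaped buffer and the needs-quoting flag together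
-- (': ' found via a previous-character state); same return value, different decomposition.


-- ===== PORT A =====
def pvSpecialChars : List (List Char) :=
  [['"'], ['\\'], ['\n'], ['\r'], ['\t'], ['#'], [':',' '], ['['], [']'], ['{'], ['}'],
   [','], ['*'], ['&'], ['!'], ['|'], ['>'], ['%'], ['@'], ['`']]

def pvEscA (cs : List Char) : List Char :=
  if cs = [] then ['"', '"']
  else
    let needs0 := pvSpecialChars.foldl (fun nq ch => nq || PySem.Chars.isIn ch cs) false
    let needs := needs0 ||
      (PySem.Chars.startswith cs [' '] || PySem.Chars.startswith cs ['-'] ||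
       PySem.Chars.startswith cs ['?'] || PySem.Chars.startswith cs [':'] ||
       PySem.Chars.endswith cs [' '])
    if needs = false then cs
    else
      let v1 := PySem.Chars.replace cs ['\\'] ['\\', '\\']
      let v2 := PySem.Chars.replace v1 ['"'] ['\\', '"']
      let v3 := PySem.Chars.replace v2 ['\n'] ['\\', 'n']
      let v4 := PySem.Chars.replace v3 ['\r'] ['\\', 'r']
      let v5 := PySem.Chars.replace v4 ['\t'] ['\\', 't']
      '"' :: v5 ++ ['"']

def escape_yaml_string_py (value : String) : String := String.ofList (pvEscA value.toList)

-- ===== PORT B =====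
def pvEscChar (c : Char) : List Char :=
  if c = '\\' then ['\\', '\\']
  else if c = '"' then ['\\', '"']
  else if c = '\n' then ['\\', 'n']
  else if c = '\r' then ['\\', 'r']
  else if c = '\t' then ['\\', 't']
  else [c]

def pvSingles : List Char :=
  ['"', '\\', '\n', '\r', '\t', '#', '[', ']', '{', '}', ',', '*', '&', '!', '|', '>', '%', '@', '`']

def pvEscB (cs : List Char) : List Char :=
  match cs with
  | [] => ['"', '"']
  | c0 :: rest =>
    let needs0 : Bool :=
      (c0 == ' ' || c0 == '-' || c0 == '?' || c0 == ':') || (c0 :: rest).getLast (by simp) == ' '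
    let st := (c0 :: rest).foldl
      (fun (st : List Char × Bool × Option Char) ch =>
        (st.1 ++ pvEscChar ch,
         st.2.1 || pvSingles.contains ch || (st.2.2 == some ':' && ch == ' '),
         some ch))
      ([], needs0, none)
    if st.2.1 then '"' :: st.1 ++ ['"'] else c0 :: rest

def escape_yaml_string_py_alt (value : String) : String := String.ofList (pvEscB value.toList)

-- ===== PRECONDITION & SPEC =====
def Spec_escape_yaml_string_py (value : String) (out : String) : Prop := out = escape_yaml_string_py_alt value
instance (value : String) (out : String) : Decidable (Spec_escape_yaml_string_py value out) := by unfold Spec_escape_yaml_string_py; infer_instance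

-- ===== CLAIM =====
def Claim_equal_escape_yaml_string_py : Prop := ∀ (value : String), Dom_escape_yaml_string_py value → Spec_escape_yaml_string_py value (escape_yaml_string_py value)

-- ===== LEMMAS AND PROOFS =====

-- B's needs-scan, abstracted: the flag the prev/ch lookahead accumulates over the rest of the list
def pvScanNeeds (prev : Option Char) : List Char → Bool
  | [] => false
  | c :: t => pvSingles.contains c || (prev == some ':' && c == ' ') || pvScanNeeds (some c) t

-- ': ' occurs as an adjacent pair
def pvHasCS : List Char → Bool
  | a :: b :: t => (a == ':' && b == ' ') || pvHasCS (b :: t)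
  | _ => false

lemma pvScan_fold (l : List Char) : ∀ (b : Bool) (prev : Option Char),
    (l.foldl (fun (s : Bool × Option Char) ch =>
      (s.1 || pvSingles.contains ch || (s.2 == some ':' && ch == ' '), some ch)) (b, prev)).1
    = (b || pvScanNeeds prev l) := by
  induction l with
  | nil => intro b prev; simp [pvScanNeeds]
  | cons c t ih =>
    intro b prev
    rw [List.foldl_cons, ih]
    simp only [pvScanNeeds, Bool.or_assoc]

lemma pvScanNeeds_some (cs : List Char) : ∀ p : Char,
    pvScanNeeds (some p) cs = (cs.any (fun c => pvSingles.contains c) || pvHasCS (p :: cs)) := by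
  induction cs with
  | nil => intro p; rfl
  | cons c t ih =>
    intro p
    rw [Bool.eq_iff_iff]
    simp only [pvScanNeeds, ih, List.any_cons, pvHasCS, Bool.or_eq_true, Bool.and_eq_true,
      beq_iff_eq, Option.some.injEq]
    tauto

lemma pvScanNeeds_none (cs : List Char) :
    pvScanNeeds none cs = (cs.any (fun c => pvSingles.contains c) || pvHasCS cs) := by
  cases cs with
  | nil => rfl
  | cons c t =>
    rw [Bool.eq_iff_iff]
    simp only [pvScanNeeds, pvScanNeeds_some, List.any_cons, Bool.or_eq_true,
      Bool.and_eq_true, beq_iff_eq, reduceCtorEq, false_and]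
    tauto

lemma pvHasCS_iff (cs : List Char) : pvHasCS cs = true ↔ [':', ' '] <:+: cs := by
  induction cs with
  | nil => simp [pvHasCS]
  | cons a t ih =>
    cases t with
    | nil => simp [pvHasCS, List.infix_cons_iff, List.cons_prefix_cons]
    | cons b t' =>
      rw [List.infix_cons_iff]
      simp only [pvHasCS, Bool.or_eq_true, Bool.and_eq_true, beq_iff_eq, ih,
        List.cons_prefix_cons, List.nil_prefix, and_true]
      tauto

-- single-char replace is a per-character flatMap
lemma pvReplace_go_single (o : Char) (new : List Char) :
    ∀ (l acc : List Char),
      PySem.Chars.replace.go [o] new l.length l acc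
        = acc.reverse ++ l.flatMap (fun c => if c = o then new else [c]) := by
  intro l
  induction l with
  | nil => intro acc; simp [PySem.Chars.replace.go]
  | cons c t ih =>
    intro acc
    simp only [List.length_cons, PySem.Chars.replace.go, List.isPrefixOf_iff_prefix,
      List.cons_prefix_cons, List.nil_prefix, and_true, List.length_cons, List.length_nil,
      zero_add, List.drop_succ_cons, List.drop_zero]
    by_cases h : o = c
    · subst h
      simp [ih, List.flatMap_cons]
    · have h' : c ≠ o := fun hc => h hc.symm
      simp [h, ih, List.flatMap_cons, h']

lemma pvReplace_single (cs : List Char) (o : Char) (new : List Char) :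
    PySem.Chars.replace cs [o] new = cs.flatMap (fun c => if c = o then new else [c]) := by
  simp [PySem.Chars.replace, pvReplace_go_single]

lemma pvEscChain (cs : List Char) :
    PySem.Chars.replace (PySem.Chars.replace (PySem.Chars.replace (PySem.Chars.replace
      (PySem.Chars.replace cs ['\\'] ['\\', '\\']) ['"'] ['\\', '"']) ['\n'] ['\\', 'n'])
      ['\r'] ['\\', 'r']) ['\t'] ['\\', 't'] = cs.flatMap pvEscChar := by
  simp only [pvReplace_single, List.flatMap_assoc]
  apply List.flatMap_congr
  intro c _
  by_cases h1 : c = '\\'; · subst h1; decide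
  by_cases h2 : c = '"'; · subst h2; decide
  by_cases h3 : c = '\n'; · subst h3; decide
  by_cases h4 : c = '\r'; · subst h4; decide
  by_cases h5 : c = '\t'; · subst h5; decide
  simp [pvEscChar, h1, h2, h3, h4, h5]

-- Bool-level bridges from A's string primitives to B's atoms
lemma pvIsIn_singleton (a : Char) (cs : List Char) :
    PySem.Chars.isIn [a] cs = cs.contains a := by
  rw [Bool.eq_iff_iff]
  simp [PySem.Chars.isIn_iff_infix, List.singleton_infix_iff]

lemma pvIsIn_colon_space (cs : List Char) :
    PySem.Chars.isIn [':', ' '] cs = pvHasCS cs := by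
  rw [Bool.eq_iff_iff, PySem.Chars.isIn_iff_infix, pvHasCS_iff]

lemma pvStartswith_singleton (c0 x : Char) (rest : List Char) :
    PySem.Chars.startswith (c0 :: rest) [x] = (c0 == x) := by
  rw [Bool.eq_iff_iff]
  simp only [PySem.Chars.startswith_iff, List.cons_prefix_cons, List.nil_prefix, and_true,
    beq_iff_eq]
  exact eq_comm

-- trailing-space suffix test read off the last element
lemma pvEndswith_last (c0 : Char) (rest : List Char) :
    PySem.Chars.endswith (c0 :: rest) [' '] = ((c0 :: rest).getLast (by simp) == ' ') := by
  rw [Bool.eq_iff_iff, PySem.Chars.endswith_iff]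
  have h1 : ([' '] <:+ (c0 :: rest)) ↔ (c0 :: rest).getLast? = some ' ' := by
    rw [List.getLast?_eq_some_iff]
    constructor
    · rintro ⟨s, hs⟩; exact ⟨s, hs.symm⟩
    · rintro ⟨s, hs⟩; exact ⟨s, hs.symm⟩
  rw [h1, List.getLast?_eq_some_getLast (by simp), Option.some_inj]
  simp

lemma pvAny_swap (xs ys : List Char) :
    xs.any (fun c => ys.contains c) = ys.any (fun s => xs.contains s) := by
  rw [Bool.eq_iff_iff]
  simp only [List.any_eq_true, List.contains_iff_mem]
  exact ⟨fun ⟨c, h1, h2⟩ => ⟨c, h2, h1⟩, fun ⟨c, h1, h2⟩ => ⟨c, h2, h1⟩⟩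

-- the two needs-quoting decisions agree
lemma pvNeeds_eq (c0 : Char) (rest : List Char) :
    (pvSpecialChars.foldl (fun nq ch => nq || PySem.Chars.isIn ch (c0 :: rest)) false ||
      (PySem.Chars.startswith (c0 :: rest) [' '] || PySem.Chars.startswith (c0 :: rest) ['-'] ||
       PySem.Chars.startswith (c0 :: rest) ['?'] || PySem.Chars.startswith (c0 :: rest) [':'] ||
       PySem.Chars.endswith (c0 :: rest) [' ']))
    = (((c0 == ' ' || c0 == '-' || c0 == '?' || c0 == ':') ||
        (c0 :: rest).getLast (by simp) == ' ') || pvScanNeeds none (c0 :: rest)) := by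
  rw [pvScanNeeds_none, pvAny_swap]
  simp only [pvSpecialChars, pvSingles, List.foldl_cons, List.foldl_nil, List.any_cons,
    List.any_nil, pvIsIn_singleton, pvIsIn_colon_space, pvStartswith_singleton,
    pvEndswith_last, Bool.false_or, Bool.or_false]
  ac_rfl

-- main list-level equality
lemma pvEsc_eq (cs : List Char) : pvEscA cs = pvEscB cs := by
  cases cs with
  | nil => rfl
  | cons c0 rest =>
    unfold pvEscA pvEscB
    simp only [reduceCtorEq, reduceIte]
    rw [PySem.List.foldl_prod_mk
      (f := fun (out : List Char) ch => out ++ pvEscChar ch)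
      (g := fun (s : Bool × Option Char) ch =>
        (s.1 || pvSingles.contains ch || (s.2 == some ':' && ch == ' '), some ch))]
    rw [pvScan_fold, PySem.List.foldl_append_eq_flatMap, pvNeeds_eq]
    cases h : (((c0 == ' ' || c0 == '-' || c0 == '?' || c0 == ':') ||
        (c0 :: rest).getLast (by simp) == ' ') || pvScanNeeds none (c0 :: rest)) with
    | false => simp
    | true => simp [pvEscChain]

-- ===== VERDICT =====
theorem escape_yaml_string_py_spec : Claim_equal_escape_yaml_string_py := by
  intro value _
  unfold Spec_escape_yaml_string_py escape_yaml_string_py escape_yaml_string_py_alt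
  rw [pvEsc_eq]
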